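-- pv_equiv track=rewrite | github.com/ShamsAnsari/KattisSolutions | chartingprogress.py | chart_to_string
-- ===== SOURCE A (Python) =====
-- def chart_to_string(chart):
--     string = ""
--     num_rows = len(chart)
--     num_cols = len(chart[0])
--     for col in range(num_cols):
--         for row in range(num_rows):
--             string += chart[row][col]
--         string += "\n"
--     string += "\n"
--     return string
-- ===== SOURCE B (Python) =====
-- def chart_to_string(chart):
--     cols = [[] for _ in range(len(chart[0]))]
--     for row in chart:
--         for c, buf in enumerate(cols):
--             buf.append(row[c])
--     return "".join("".join(buf) + "\n" for buf in cols) + "\n"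
-- ===== Notes on version B (the rewrite author's own statement) =====
-- stated objective: alternative
-- what changed: Instead of A's column-major double loop concatenating cell by cell onto one string, B makes a single row-major pass that distributes each row's cells into per-column accumulator lists and joins the buffers once at the end.
import Mathlib
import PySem

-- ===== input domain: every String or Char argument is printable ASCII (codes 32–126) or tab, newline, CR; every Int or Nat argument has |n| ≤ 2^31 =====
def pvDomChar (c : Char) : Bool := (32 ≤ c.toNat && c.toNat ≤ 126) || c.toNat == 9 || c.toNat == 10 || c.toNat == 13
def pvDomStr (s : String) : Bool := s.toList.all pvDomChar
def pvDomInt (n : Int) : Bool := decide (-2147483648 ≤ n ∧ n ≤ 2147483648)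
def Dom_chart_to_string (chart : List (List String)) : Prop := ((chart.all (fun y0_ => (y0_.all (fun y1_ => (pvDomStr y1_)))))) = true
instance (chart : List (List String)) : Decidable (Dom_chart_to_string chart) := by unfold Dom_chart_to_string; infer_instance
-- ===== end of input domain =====

-- B replaces A's column-major double loop (cell-by-cell string appends) by one
-- row-major pass distributing cells into per-column accumulators, joined at the
-- end (objective: alternative decomposition of the traversal).

-- ===== PORT A =====
def chart_to_string (chart : List (List String)) : String :=
  let string : String := ""
  let num_rows : Int := chart.length
  let num_cols : Int := (PySem.List.pyGetD chart 0 []).length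
  let string := (PySem.List.pyRange 0 num_cols 1).foldl
    (fun string col =>
      ((PySem.List.pyRange 0 num_rows 1).foldl
        (fun string row =>
          string ++ PySem.List.pyGetD (PySem.List.pyGetD chart row []) col "") string) ++ "\n")
    string
  string ++ "\n"

-- ===== PORT B =====
-- one pass over the rows; each row's cells are appended to the column buffers
def chart_to_string_alt (chart : List (List String)) : String :=
  let cols : List (List String) :=
    (List.range (PySem.List.pyGetD chart 0 []).length).map (fun _ => [])
  let cols := chart.foldl
    (fun cols row => cols.mapIdx (fun c buf => buf ++ [PySem.List.pyGetD row (c : Int) ""]))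
    cols
  PySem.Str.join "" (cols.map (fun buf => PySem.Str.join "" buf ++ "\n")) ++ "\n"

-- ===== PRECONDITION & SPEC =====
-- Pre_ excludes exactly the inputs where A raises IndexError: the empty chart
-- (chart[0] fails) and charts with a row shorter than row 0 (chart[row][col] fails).
def Pre_chart_to_string (chart : List (List String)) : Prop :=
  chart ≠ [] ∧ ∀ r ∈ chart, (chart.headD []).length ≤ r.length
instance (chart : List (List String)) : Decidable (Pre_chart_to_string chart) := by
  unfold Pre_chart_to_string; infer_instance
def pvWitness_chart_to_string : List (List String) := [["a", "b"], ["c", "d"]]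

def Spec_chart_to_string (chart : List (List String)) (out : String) : Prop := out = chart_to_string_alt chart
instance (chart : List (List String)) (out : String) : Decidable (Spec_chart_to_string chart out) := by unfold Spec_chart_to_string; infer_instance

-- ===== CLAIM (what is proved, stated in full; the proofs are below) =====
def Claim_equal_chart_to_string : Prop := ∀ (chart : List (List String)), Dom_chart_to_string chart → Pre_chart_to_string chart → Spec_chart_to_string chart (chart_to_string chart)
-- ===== LEMMAS AND PROOFS =====

-- joining with the empty separator is concatenation
theorem joinEmpty (l : List (List Char)) : PySem.Chars.join [] l = l.flatten := by
  induction l with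
  | nil => simp [PySem.Chars.join_nil]
  | cons a t ih =>
    cases t with
    | nil => simp [PySem.Chars.join_singleton]
    | cons b u => simp [PySem.Chars.join_cons_cons, ih]

-- generic fold-of-appends lemma, at the character-list level
theorem foldl_toList {α : Type} (g : String → α → String) (p : α → List Char)
    (h : ∀ s x, (g s x).toList = s.toList ++ p x) :
    ∀ (l : List α) (init : String),
      (l.foldl g init).toList = init.toList ++ (l.map p).flatten := by
  intro l
  induction l with
  | nil => intro init; simp
  | cons x t ih => intro init; simp [List.foldl_cons, ih, h]

-- mapIdx over a map over range evaluates pointwise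
theorem mapIdx_map_range {α β : Type} (g : Nat → α) (h : Nat → α → β) (L : Nat) :
    ((List.range L).map g).mapIdx h = (List.range L).map (fun i => h i (g i)) := by
  apply List.ext_getElem
  · simp
  · intro i h1 h2
    simp [List.getElem_mapIdx]

-- invariant of B's row pass: the buffers hold one entry per processed row
theorem fold_rows (L : Nat) :
    ∀ (rows : List (List String)) (g : Nat → List String),
      rows.foldl
        (fun cols row => cols.mapIdx (fun c buf => buf ++ [PySem.List.pyGetD row (c : Int) ""]))
        ((List.range L).map g)
      = (List.range L).map
          (fun c => g c ++ rows.map (fun r => PySem.List.pyGetD r (c : Int) "")) := by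
  intro rows
  induction rows with
  | nil => intro g; simp
  | cons r rs ih =>
    intro g
    rw [List.foldl_cons, mapIdx_map_range, ih (fun c => g c ++ [PySem.List.pyGetD r (c : Int) ""])]
    simp

-- A's value, characterized as a flatten of column pieces
theorem chartA_toList (chart : List (List String)) (h : Pre_chart_to_string chart) :
    (chart_to_string chart).toList =
      ((List.range (chart.headD []).length).map
        (fun c => (chart.map (fun r => (r.getD c "").toList)).flatten ++ ("\n" : String).toList)).flatten
      ++ ("\n" : String).toList := by
  obtain ⟨hne, hall⟩ := h
  match chart with
  | r :: rs =>
    have key : ∀ (col : Int) (s : String),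
        (((PySem.List.pyRange 0 (((r :: rs).length : Nat) : Int) 1).foldl
          (fun string row => string ++ PySem.List.pyGetD (PySem.List.pyGetD (r :: rs) row []) col "") s) ++ "\n").toList
        = s.toList ++ (((r :: rs).map (fun row => (PySem.List.pyGetD row col "").toList)).flatten ++ ("\n" : String).toList) := by
      intro col s
      rw [PySem.List.foldl_pyRange_zero_pyGetD' (r :: rs) [] (fun st row => st ++ PySem.List.pyGetD row col "") s]
      rw [String.toList_append]
      rw [foldl_toList (fun st row => st ++ PySem.List.pyGetD row col "")
            (fun row => (PySem.List.pyGetD row col "").toList) (by intro s x; simp) (r :: rs) s]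
      simp
    have hw : PySem.List.pyGetD (r :: rs) 0 [] = r := by
      simp [PySem.List.pyGetD, PySem.List.pyGet?, PySem.List.pyIdx?]
    simp only [chart_to_string, hw]
    rw [PySem.List.pyRange_zero_nat r.length]
    rw [List.foldl_map]
    rw [String.toList_append]
    rw [foldl_toList
          (fun s (c : Nat) =>
            ((PySem.List.pyRange 0 (((r :: rs).length : Nat) : Int) 1).foldl
              (fun string row => string ++ PySem.List.pyGetD (PySem.List.pyGetD (r :: rs) row []) (↑c) "") s) ++ "\n")
          (fun c => ((r :: rs).map (fun row => (PySem.List.pyGetD row (↑c : Int) "").toList)).flatten ++ ("\n" : String).toList)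
          (by intro s c; exact key (↑c) s) (List.range r.length) ""]
    simp [PySem.List.pyGetD_natCast]

-- B's value, same characterization
theorem chartB_toList (chart : List (List String)) (h : Pre_chart_to_string chart) :
    (chart_to_string_alt chart).toList =
      ((List.range (chart.headD []).length).map
        (fun c => (chart.map (fun r => (r.getD c "").toList)).flatten ++ ("\n" : String).toList)).flatten
      ++ ("\n" : String).toList := by
  obtain ⟨hne, hall⟩ := h
  match chart with
  | r :: rs =>
    have hw : PySem.List.pyGetD (r :: rs) 0 [] = r := by
      simp [PySem.List.pyGetD, PySem.List.pyGet?, PySem.List.pyIdx?]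
    simp only [chart_to_string_alt, hw]
    rw [fold_rows r.length (r :: rs) (fun _ => [])]
    rw [String.toList_append]
    simp [PySem.Str.join, joinEmpty, List.map_map, Function.comp_def, String.toList_append,
      PySem.List.pyGetD_natCast]

-- ===== VERDICT (by name: the statement is the Claim_ definition above) =====
theorem chart_to_string_spec : Claim_equal_chart_to_string := by
  intro chart _ hpre
  unfold Spec_chart_to_string
  apply String.ext
  rw [chartA_toList chart hpre, chartB_toList chart hpre]
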